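-- pv_equiv track=rewrite | github.com/18816132863/pigeon-king | scripts/v104_final_consistency_conflict_cleanup_gate.py | replace_banned_agents
-- ===== SOURCE A (Python) =====
-- def replace_banned_agents(text: str) -> str:
--     replacements = {
--         "Search the web, check calendars": "离线模式下禁止联网、外部 API、日历、邮箱、平台操作；如需启用必须显式解除离线模式并走审批。",
--         "Skip the secrets unless asked to keep them": "密码、token、验证码、支付凭证默认禁止写入长期记忆，即使用户要求也必须强确认并默认拒绝。",
--         "Commit and push your own changes": "Git 只允许本地 status/diff；push 属于外发动作，必须审批并默认截断。",
--     }
--     for old, new in replacements.items():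
--         text = text.replace(old, new)
--     return text
-- ===== SOURCE B (Python) =====
-- def replace_banned_agents(text: str) -> str:
--     # Single left-to-right scan: at each position emit the replacement for
--     # whichever banned phrase starts there (phrases never overlap), else the char.
--     rules = [
--         ("Search the web, check calendars", "离线模式下禁止联网、外部 API、日历、邮箱、平台操作；如需启用必须显式解除离线模式并走审批。"),
--         ("Skip the secrets unless asked to keep them", "密码、token、验证码、支付凭证默认禁止写入长期记忆，即使用户要求也必须强确认并默认拒绝。"),
--         ("Commit and push your own changes", "Git 只允许本地 status/diff；push 属于外发动作，必须审批并默认截断。"),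
--     ]
--     out = []
--     i = 0
--     n = len(text)
--     while i < n:
--         for old, new in rules:
--             if text.startswith(old, i):
--                 out.append(new)
--                 i += len(old)
--                 break
--         else:
--             out.append(text[i])
--             i += 1
--     return "".join(out)
-- ===== Notes on version B (the rewrite author's own statement) =====
-- stated objective: alternative
-- what changed: A applies three sequential full-string str.replace passes; B scans the text once left-to-right, emitting the replacement of whichever banned phrase starts at the current position (phrases provably never overlap), else copying the character.
import Mathlib
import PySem

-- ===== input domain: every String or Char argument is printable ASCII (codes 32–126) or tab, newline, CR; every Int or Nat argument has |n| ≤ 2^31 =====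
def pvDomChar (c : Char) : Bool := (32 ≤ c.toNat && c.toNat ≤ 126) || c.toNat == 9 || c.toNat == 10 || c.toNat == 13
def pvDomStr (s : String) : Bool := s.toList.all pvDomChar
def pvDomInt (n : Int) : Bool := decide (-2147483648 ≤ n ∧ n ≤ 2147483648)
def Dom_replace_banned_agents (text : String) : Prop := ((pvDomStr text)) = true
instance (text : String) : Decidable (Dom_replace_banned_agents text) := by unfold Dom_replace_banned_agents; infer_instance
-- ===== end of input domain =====

-- B replaces A's three sequential full-string replace passes by a single left-to-right scan
-- that matches all three banned phrases at once (alternative decomposition, same result).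

set_option maxRecDepth 100000


-- ===== PORT A =====
-- A: a dict of three replacements, applied one after the other with str.replace.
def replace_banned_agents (text : String) : String :=
  let replacements : List (String × String) :=
    [("Search the web, check calendars",
      "离线模式下禁止联网、外部 API、日历、邮箱、平台操作；如需启用必须显式解除离线模式并走审批。"),
     ("Skip the secrets unless asked to keep them",
      "密码、token、验证码、支付凭证默认禁止写入长期记忆，即使用户要求也必须强确认并默认拒绝。"),
     ("Commit and push your own changes",
      "Git 只允许本地 status/diff；push 属于外发动作，必须审批并默认截断。")]
  replacements.foldl (fun t p => PySem.Str.replace t p.1 p.2) text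

-- ===== PORT B =====
-- B's rule table (the three banned phrases and their replacements), as char lists.
def pvK1 : List Char := "Search the web, check calendars".toList
def pvR1 : List Char := "离线模式下禁止联网、外部 API、日历、邮箱、平台操作；如需启用必须显式解除离线模式并走审批。".toList
def pvK2 : List Char := "Skip the secrets unless asked to keep them".toList
def pvR2 : List Char := "密码、token、验证码、支付凭证默认禁止写入长期记忆，即使用户要求也必须强确认并默认拒绝。".toList
def pvK3 : List Char := "Commit and push your own changes".toList
def pvR3 : List Char := "Git 只允许本地 status/diff；push 属于外发动作，必须审批并默认截断。".toList

-- B's single scan: at each position emit the replacement of whichever phrase starts there,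
-- else copy the character.  (t.drop (len-1) is the Python 'i += len(old)' on the cons cell.)
def pvScan : List Char → List Char
  | [] => []
  | c :: t =>
    if pvK1.isPrefixOf (c :: t) then pvR1 ++ pvScan (t.drop (pvK1.length - 1))
    else if pvK2.isPrefixOf (c :: t) then pvR2 ++ pvScan (t.drop (pvK2.length - 1))
    else if pvK3.isPrefixOf (c :: t) then pvR3 ++ pvScan (t.drop (pvK3.length - 1))
    else c :: pvScan t
termination_by l => l.length
decreasing_by all_goals (simp only [List.length_drop, List.length_cons]; omega)


def replace_banned_agents_alt (text : String) : String :=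
  String.ofList (pvScan text.toList)

-- ===== PRECONDITION & SPEC =====
def Spec_replace_banned_agents (text : String) (out : String) : Prop := out = replace_banned_agents_alt text
instance (text : String) (out : String) : Decidable (Spec_replace_banned_agents text out) := by unfold Spec_replace_banned_agents; infer_instance

-- ===== CLAIM (what is proved, stated in full; the proofs are below) =====
def Claim_equal_replace_banned_agents : Prop := ∀ (text : String), Dom_replace_banned_agents text → Spec_replace_banned_agents text (replace_banned_agents text)

-- ===== LEMMAS AND PROOFS =====

-- Structural form of one str.replace pass (old nonempty): used to relate A's port to B's scan.
def pvRep (old new : List Char) : List Char → List Char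
  | [] => []
  | c :: t =>
    if old.isPrefixOf (c :: t) then new ++ pvRep old new (t.drop (old.length - 1))
    else c :: pvRep old new t
termination_by l => l.length
decreasing_by all_goals (simp only [List.length_drop, List.length_cons]; omega)


-- "a cannot start anywhere strictly inside b"
def NoCross (a b : List Char) : Prop :=
  ∀ j < b.length, ¬ (b.drop j <+: a) ∧ ¬ (a <+: b.drop j)

theorem prefix_append_split {p u v : List Char} (h : p <+: u ++ v) : p <+: u ∨ u <+: p := by
  rcases le_or_gt p.length u.length with hle | hgt
  · exact Or.inl (List.prefix_of_prefix_length_le h (u.prefix_append v) hle)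
  · exact Or.inr (List.prefix_of_prefix_length_le (u.prefix_append v) h hgt.le)

-- PySem.Chars.replace (old ≠ []) equals pvRep.
theorem go_eq (old new : List Char) (hold : old ≠ []) :
    ∀ (fuel : Nat) (l acc : List Char), l.length ≤ fuel →
      PySem.Chars.replace.go old new fuel l acc = acc.reverse ++ pvRep old new l := by
  intro fuel
  induction fuel with
  | zero =>
    intro l acc hl
    have : l = [] := List.eq_nil_of_length_eq_zero (Nat.le_zero.mp hl)
    subst this
    simp [PySem.Chars.replace.go, pvRep]
  | succ n ih =>
    intro l acc hl
    cases l with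
    | nil => simp [PySem.Chars.replace.go, pvRep]
    | cons c t =>
      obtain ⟨d, old', rfl⟩ := List.exists_cons_of_ne_nil hold
      by_cases hp : (d :: old').isPrefixOf (c :: t)
      · have hdrop : (c :: t).drop (d :: old').length = t.drop ((d :: old').length - 1) := by
          simp
        rw [show PySem.Chars.replace.go (d :: old') new (n+1) (c :: t) acc =
              PySem.Chars.replace.go (d :: old') new n ((c :: t).drop (d :: old').length)
                (new.reverse ++ acc) by simp [PySem.Chars.replace.go, hp]]
        rw [hdrop, ih _ _ (by simp only [List.length_drop]; simp at hl; omega)]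
        simp [pvRep, hp]
      · rw [show PySem.Chars.replace.go (d :: old') new (n+1) (c :: t) acc =
              PySem.Chars.replace.go (d :: old') new n t (c :: acc) by
            simp [PySem.Chars.replace.go, hp]]
        rw [ih _ _ (by simpa using Nat.le_of_succ_le_succ hl)]
        simp [pvRep, hp]

theorem replace_eq (l old new : List Char) (hold : old ≠ []) :
    PySem.Chars.replace l old new = pvRep old new l := by
  unfold PySem.Chars.replace
  rw [if_neg (by simp [List.isEmpty_iff, hold])]
  simpa using go_eq old new hold l.length l [] le_rfl

-- pvRep on a block it matches at the front.
theorem pvRep_match (old new y : List Char) (hold : old ≠ []) :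
    pvRep old new (old ++ y) = new ++ pvRep old new y := by
  obtain ⟨c, t, rfl⟩ := List.exists_cons_of_ne_nil hold
  have hp : (c :: t).isPrefixOf (c :: (t ++ y)) = true :=
    List.isPrefixOf_iff_prefix.mpr (by simp)
  show pvRep (c :: t) new (c :: (t ++ y)) = _
  rw [pvRep, if_pos hp]
  simp

-- pvRep passes over a block old cannot start inside.
theorem pvRep_skip (old new : List Char) :
    ∀ (p y : List Char), (∀ j < p.length, ¬ old <+: (p.drop j ++ y)) →
      pvRep old new (p ++ y) = p ++ pvRep old new y := by
  intro p
  induction p with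
  | nil => intro y _; simp
  | cons c p' ih =>
    intro y h
    have h0 : ¬ old.isPrefixOf (c :: (p' ++ y)) := by
      intro hc
      exact h 0 (by simp) (by simpa using List.isPrefixOf_iff_prefix.mp hc)
    show pvRep old new (c :: (p' ++ y)) = _
    rw [pvRep, if_neg h0, ih y (fun j hj => h (j+1) (by simpa using Nat.succ_lt_succ hj))]
    simp

theorem skip_of_nocross (old new p y : List Char) (h : NoCross old p) :
    pvRep old new (p ++ y) = p ++ pvRep old new y := by
  apply pvRep_skip old new
  intro j hj hpre
  rw [← List.drop_append_of_le_length (Nat.le_of_lt hj)] at hpre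
  rw [List.drop_append_of_le_length (Nat.le_of_lt hj)] at hpre
  rcases prefix_append_split hpre with h1 | h2
  · exact (h j hj).2 h1
  · exact (h j hj).1 h2

-- A prefix of pvRep's output whose characters all avoid new's first character
-- was already a prefix of the input.
theorem pvRep_pres (old new K : List Char) (hnew : new ≠ [])
    (hhead : ∀ c, new.head? = some c → c ∉ K) :
    ∀ (t sub : List Char), sub <+: pvRep old new t → (∀ c ∈ sub, c ∈ K) → sub <+: t := by
  intro t
  induction t with
  | nil =>
    intro sub hsub _
    rw [show pvRep old new [] = [] from by rw [pvRep]] at hsub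
    simpa using hsub
  | cons c t' ih =>
    intro sub hsub hmem
    by_cases hp : old.isPrefixOf (c :: t')
    · rw [pvRep, if_pos hp] at hsub
      cases sub with
      | nil => exact List.nil_prefix
      | cons s0 sub' =>
        obtain ⟨n0, new', rfl⟩ := List.exists_cons_of_ne_nil hnew
        have hs0 : s0 = n0 := by
          obtain ⟨tl, ht⟩ := hsub
          rw [List.cons_append] at ht
          injection ht with h1 _
        exact absurd (hmem s0 List.mem_cons_self) (hs0 ▸ hhead n0 rfl)
    · rw [pvRep, if_neg hp] at hsub
      cases sub with
      | nil => exact List.nil_prefix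
      | cons s0 sub' =>
        rcases List.cons_prefix_cons.mp hsub with ⟨rfl, hsub'⟩
        exact List.cons_prefix_cons.mpr
          ⟨rfl, ih sub' hsub' (fun x hx => hmem x (List.mem_cons_of_mem _ hx))⟩

-- The three phrases never start strictly inside one another, nor inside a replacement.
theorem nc_12 : NoCross pvK1 pvK2 := by unfold NoCross; decide
theorem nc_13 : NoCross pvK1 pvK3 := by unfold NoCross; decide
theorem nc_23 : NoCross pvK2 pvK3 := by unfold NoCross; decide
theorem nc_2r1 : NoCross pvK2 pvR1 := by unfold NoCross; decide
theorem nc_3r1 : NoCross pvK3 pvR1 := by unfold NoCross; decide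
theorem nc_3r2 : NoCross pvK3 pvR2 := by unfold NoCross; decide

theorem not_prefix_of_nocross (a b y : List Char) (hb : b ≠ []) (h : NoCross a b) :
    ¬ a <+: b ++ y := by
  intro hp
  have h0 := h 0 (by cases b with | nil => exact absurd rfl hb | cons x xs => simp)
  rw [List.drop_zero] at h0
  rcases prefix_append_split hp with h1 | h2
  · exact h0.2 h1
  · exact h0.1 h2

-- Unfolding lemmas for pvScan on each kind of front.
theorem pvScan_m1 (y : List Char) : pvScan (pvK1 ++ y) = pvR1 ++ pvScan y := by
  obtain ⟨c, t, he⟩ := List.exists_cons_of_ne_nil (show pvK1 ≠ [] by decide)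
  have hp : pvK1.isPrefixOf (c :: (t ++ y)) = true := by
    rw [he]; exact List.isPrefixOf_iff_prefix.mpr (by simp)
  rw [he, List.cons_append, pvScan, if_pos hp]
  rw [show pvK1.length - 1 = t.length from by rw [he]; simp, List.drop_left]

theorem pvScan_m2 (y : List Char) : pvScan (pvK2 ++ y) = pvR2 ++ pvScan y := by
  obtain ⟨c, t, he⟩ := List.exists_cons_of_ne_nil (show pvK2 ≠ [] by decide)
  have h1 : ¬ pvK1.isPrefixOf (c :: (t ++ y)) = true := by
    rw [← List.cons_append, ← he]
    exact fun hc => not_prefix_of_nocross pvK1 pvK2 y (by decide) nc_12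
      (List.isPrefixOf_iff_prefix.mp hc)
  have hp : pvK2.isPrefixOf (c :: (t ++ y)) = true := by
    rw [he]; exact List.isPrefixOf_iff_prefix.mpr (by simp)
  rw [he, List.cons_append, pvScan, if_neg h1, if_pos hp]
  rw [show pvK2.length - 1 = t.length from by rw [he]; simp, List.drop_left]

theorem pvScan_m3 (y : List Char) : pvScan (pvK3 ++ y) = pvR3 ++ pvScan y := by
  obtain ⟨c, t, he⟩ := List.exists_cons_of_ne_nil (show pvK3 ≠ [] by decide)
  have h1 : ¬ pvK1.isPrefixOf (c :: (t ++ y)) = true := by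
    rw [← List.cons_append, ← he]
    exact fun hc => not_prefix_of_nocross pvK1 pvK3 y (by decide) nc_13
      (List.isPrefixOf_iff_prefix.mp hc)
  have h2 : ¬ pvK2.isPrefixOf (c :: (t ++ y)) = true := by
    rw [← List.cons_append, ← he]
    exact fun hc => not_prefix_of_nocross pvK2 pvK3 y (by decide) nc_23
      (List.isPrefixOf_iff_prefix.mp hc)
  have hp : pvK3.isPrefixOf (c :: (t ++ y)) = true := by
    rw [he]; exact List.isPrefixOf_iff_prefix.mpr (by simp)
  rw [he, List.cons_append, pvScan, if_neg h1, if_neg h2, if_pos hp]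
  rw [show pvK3.length - 1 = t.length from by rw [he]; simp, List.drop_left]

theorem pvScan_step (c : Char) (t : List Char)
    (h1 : ¬ pvK1 <+: c :: t) (h2 : ¬ pvK2 <+: c :: t) (h3 : ¬ pvK3 <+: c :: t) :
    pvScan (c :: t) = c :: pvScan t := by
  rw [pvScan, if_neg (fun hc => h1 (List.isPrefixOf_iff_prefix.mp hc)),
      if_neg (fun hc => h2 (List.isPrefixOf_iff_prefix.mp hc)),
      if_neg (fun hc => h3 (List.isPrefixOf_iff_prefix.mp hc))]

-- A key that is no prefix of c :: t is no prefix of c :: (pvRep … t) either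
-- (its replacement's first character is not a character of the key).
theorem no_key_prefix_rep (old new K : List Char) (hnew : new ≠ [])
    (hhead : ∀ c, new.head? = some c → c ∉ K) (hK : K ≠ [])
    (c : Char) (t : List Char) (h : ¬ K <+: c :: t) : ¬ K <+: c :: pvRep old new t := by
  intro hc
  obtain ⟨k0, kt, hek⟩ := List.exists_cons_of_ne_nil hK
  rw [hek] at hc
  rcases List.cons_prefix_cons.mp hc with ⟨rfl, htl⟩
  have : kt <+: t :=
    pvRep_pres old new K hnew hhead t kt htl
      (fun x hx => by rw [hek]; exact List.mem_cons_of_mem _ hx)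
  exact h (by rw [hek]; exact List.cons_prefix_cons.mpr ⟨rfl, this⟩)

theorem head_r1_k2 : ∀ c, pvR1.head? = some c → c ∉ pvK2 := by
  intro c hc
  rw [show pvR1.head? = some '离' from rfl] at hc
  injection hc with h; subst h; decide

theorem head_r1_k3 : ∀ c, pvR1.head? = some c → c ∉ pvK3 := by
  intro c hc
  rw [show pvR1.head? = some '离' from rfl] at hc
  injection hc with h; subst h; decide

theorem head_r2_k3 : ∀ c, pvR2.head? = some c → c ∉ pvK3 := by
  intro c hc
  rw [show pvR2.head? = some '密' from rfl] at hc
  injection hc with h; subst h; decide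

-- Main lemma: the three sequential passes equal the single scan.
theorem main_eq (l : List Char) :
    pvRep pvK3 pvR3 (pvRep pvK2 pvR2 (pvRep pvK1 pvR1 l)) = pvScan l := by
  induction hn : l.length using Nat.strong_induction_on generalizing l with
  | _ n ih => ?_
  by_cases hp1 : pvK1 <+: l
  · obtain ⟨y, rfl⟩ := hp1
    rw [pvRep_match pvK1 pvR1 y (by decide),
        skip_of_nocross pvK2 pvR2 pvR1 _ nc_2r1,
        skip_of_nocross pvK3 pvR3 pvR1 _ nc_3r1,
        pvScan_m1, ih y.length (by subst hn; simp [show pvK1.length = 31 from rfl]) y rfl]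
  · by_cases hp2 : pvK2 <+: l
    · obtain ⟨y, rfl⟩ := hp2
      rw [skip_of_nocross pvK1 pvR1 pvK2 _ nc_12,
          pvRep_match pvK2 pvR2 _ (by decide),
          skip_of_nocross pvK3 pvR3 pvR2 _ nc_3r2,
          pvScan_m2, ih y.length (by subst hn; simp [show pvK2.length = 42 from rfl]) y rfl]
    · by_cases hp3 : pvK3 <+: l
      · obtain ⟨y, rfl⟩ := hp3
        rw [skip_of_nocross pvK1 pvR1 pvK3 _ nc_13,
            skip_of_nocross pvK2 pvR2 pvK3 _ nc_23,
            pvRep_match pvK3 pvR3 _ (by decide),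
            pvScan_m3, ih y.length (by subst hn; simp [show pvK3.length = 32 from rfl]) y rfl]
      · cases l with
        | nil => rw [show pvScan [] = [] from by rw [pvScan]]
                 rw [show pvRep pvK1 pvR1 [] = [] from by rw [pvRep]]
                 rw [show pvRep pvK2 pvR2 [] = [] from by rw [pvRep]]
                 rw [show pvRep pvK3 pvR3 [] = [] from by rw [pvRep]]
        | cons c t =>
          rw [show pvRep pvK1 pvR1 (c :: t) = c :: pvRep pvK1 pvR1 t from by
                rw [pvRep, if_neg (fun hc => hp1 (List.isPrefixOf_iff_prefix.mp hc))]]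
          have h2' : ¬ pvK2 <+: c :: pvRep pvK1 pvR1 t :=
            no_key_prefix_rep pvK1 pvR1 pvK2 (by decide) head_r1_k2 (by decide) c t hp2
          rw [show pvRep pvK2 pvR2 (c :: pvRep pvK1 pvR1 t) =
                c :: pvRep pvK2 pvR2 (pvRep pvK1 pvR1 t) from by
                rw [pvRep, if_neg (fun hc => h2' (List.isPrefixOf_iff_prefix.mp hc))]]
          have h3' : ¬ pvK3 <+: c :: pvRep pvK2 pvR2 (pvRep pvK1 pvR1 t) := by
            have hstep : ¬ pvK3 <+: c :: pvRep pvK1 pvR1 t :=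
              no_key_prefix_rep pvK1 pvR1 pvK3 (by decide) head_r1_k3 (by decide) c t hp3
            exact no_key_prefix_rep pvK2 pvR2 pvK3 (by decide) head_r2_k3 (by decide)
              c (pvRep pvK1 pvR1 t) hstep
          rw [show pvRep pvK3 pvR3 (c :: pvRep pvK2 pvR2 (pvRep pvK1 pvR1 t)) =
                c :: pvRep pvK3 pvR3 (pvRep pvK2 pvR2 (pvRep pvK1 pvR1 t)) from by
                rw [pvRep, if_neg (fun hc => h3' (List.isPrefixOf_iff_prefix.mp hc))]]
          rw [pvScan_step c t hp1 hp2 hp3, ih t.length (by subst hn; simp) t rfl]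

-- The three str.replace passes of A, instantiated at the literal phrases.
theorem rp1 (l : List Char) :
    PySem.Chars.replace l "Search the web, check calendars".toList
      "离线模式下禁止联网、外部 API、日历、邮箱、平台操作；如需启用必须显式解除离线模式并走审批。".toList
      = pvRep pvK1 pvR1 l := replace_eq l _ _ (by decide)

theorem rp2 (l : List Char) :
    PySem.Chars.replace l "Skip the secrets unless asked to keep them".toList
      "密码、token、验证码、支付凭证默认禁止写入长期记忆，即使用户要求也必须强确认并默认拒绝。".toList
      = pvRep pvK2 pvR2 l := replace_eq l _ _ (by decide)

theorem rp3 (l : List Char) :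
    PySem.Chars.replace l "Commit and push your own changes".toList
      "Git 只允许本地 status/diff；push 属于外发动作，必须审批并默认截断。".toList
      = pvRep pvK3 pvR3 l := replace_eq l _ _ (by decide)

-- ===== VERDICT (by name: the statement is the Claim_ definition above) =====
theorem replace_banned_agents_spec : Claim_equal_replace_banned_agents := by
  intro text _
  show replace_banned_agents text = replace_banned_agents_alt text
  simp only [replace_banned_agents, replace_banned_agents_alt, List.foldl,
    PySem.Str.replace, String.toList_ofList, rp1, rp2, rp3]
  rw [main_eq]
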